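-- pv_equiv track=rewrite | github.com/kendrick010/COGS188_project | Tetris/test.py | get_board_features
-- ===== SOURCE A (Python) =====
-- def get_board_features(board):
--     heights = [0] * len(board[0])
--     holes = 0
--     for x in range(len(board[0])):
--         column_height = 0
--         column_holes = 0
--         for y in range(len(board)):
--             if board[y][x] > 0:
--                 column_height = len(board) - y
--                 break
--         for y in range(len(board) - column_height, len(board)):
--             if board[y][x] == 0:
--                 column_holes += 1
--         heights[x] = column_height
--         holes += column_holes
--     aggregate_height = sum(heights)
--     bumpiness = sum([abs(heights[i] - heights[i+1]) for i in range(len(heights) - 1)])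
--
--     return heights + [holes, aggregate_height, bumpiness]
-- ===== SOURCE B (Python) =====
-- def get_board_features(board):
--     n = len(board)
--     heights = []
--     holes = 0
--     for x in range(len(board[0])):
--         seen = False
--         h = 0
--         for y, row in enumerate(board):
--             v = row[x]
--             if seen:
--                 if v == 0:
--                     holes += 1
--             elif v > 0:
--                 h = n - y
--                 seen = True
--         heights.append(h)
--     agg = sum(heights)
--     bump = sum(abs(a - b) for a, b in zip(heights, heights[1:]))
--     return heights + [holes, agg, bump]
-- ===== Notes on version B (the rewrite author's own statement) =====
-- stated objective: alternative
-- what changed: B fuses A's two per-column passes (a break-loop to find the height, then a second indexed rescan of the column for holes) into a single top-to-bottom pass per column that maintains a 'seen block' flag and counts zeros only after it, and computes bumpiness by zipping the heights list with its tail instead of index arithmetic.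
-- outside the precondition, e.g. on get_board_features([]): A raises IndexError, B raises IndexError
import Mathlib
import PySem

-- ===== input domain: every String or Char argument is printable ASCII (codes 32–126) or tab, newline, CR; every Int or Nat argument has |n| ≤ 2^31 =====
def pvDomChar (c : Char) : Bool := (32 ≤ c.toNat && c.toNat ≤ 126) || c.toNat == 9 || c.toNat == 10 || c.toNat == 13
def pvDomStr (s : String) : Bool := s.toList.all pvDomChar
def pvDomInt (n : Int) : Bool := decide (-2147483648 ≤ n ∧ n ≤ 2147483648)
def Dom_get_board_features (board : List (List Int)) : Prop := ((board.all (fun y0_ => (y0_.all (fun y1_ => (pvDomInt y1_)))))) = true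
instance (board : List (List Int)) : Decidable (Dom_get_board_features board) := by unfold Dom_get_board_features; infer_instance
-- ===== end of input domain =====

-- B fuses A's two per-column passes (find-height, then rescan for holes) into one top-to-bottom
-- pass with a 'seen' flag, and computes bumpiness by zipping the heights with their tail; same values.

-- ===== PORT A =====
-- board[y][x]; inside Pre_ both indices are in range, so the defaults are never used
def pvCellA (board : List (List Int)) (y x : Int) : Int :=
  PySem.List.pyGetD (PySem.List.pyGetD board y []) x 0

-- 'for y in range(len(board)): if board[y][x] > 0: column_height = len(board) - y; break'
def pvHeightLoopA (board : List (List Int)) (x : Int) : List Int → Int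
  | [] => 0
  | y :: ys => if pvCellA board y x > 0 then (board.length : Int) - y else pvHeightLoopA board x ys

-- one iteration of A's outer loop: (column_height, column_holes) for column x
def pvColA (board : List (List Int)) (x : Int) : Int × Int :=
  let n : Int := (board.length : Int)
  let ch := pvHeightLoopA board x (PySem.List.pyRange 0 n 1)
  let chol := (PySem.List.pyRange (n - ch) n 1).foldl
      (fun c y => if pvCellA board y x == 0 then c + 1 else c) (0 : Int)
  (ch, chol)

def get_board_features (board : List (List Int)) : List Int :=
  let ncols := (PySem.List.pyGetD board 0 []).length   -- len(board[0]); board ≠ [] in Pre_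
  let st := (PySem.List.pyRange 0 (ncols : Int) 1).foldl
    (fun (st : List Int × Int) xi =>
      let col := pvColA board xi
      (PySem.List.pySetD st.1 xi col.1, st.2 + col.2))
    (List.replicate ncols (0 : Int), (0 : Int))
  let heights := st.1
  let holes := st.2
  let aggregate_height := heights.sum
  let bumpiness := ((PySem.List.pyRange 0 ((heights.length : Int) - 1) 1).map
      (fun i => |PySem.List.pyGetD heights i 0 - PySem.List.pyGetD heights (i + 1) 0|)).sum
  heights ++ [holes, aggregate_height, bumpiness]

-- ===== PORT B =====
-- B's inner loop: one pass down column x with a 'seen' flag; state (seen, h, holes)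
def pvColB (board : List (List Int)) (n : Int) (x : Int) (holes0 : Int) : Bool × Int × Int :=
  (PySem.List.enumerate board 0).foldl
    (fun (c : Bool × Int × Int) yr =>
      let v := PySem.List.pyGetD yr.2 x 0
      if c.1 then (if v == 0 then (c.1, c.2.1, c.2.2 + 1) else c)
      else if v > 0 then (true, n - yr.1, c.2.2) else c)
    (false, 0, holes0)

def get_board_features_alt (board : List (List Int)) : List Int :=
  let n : Int := (board.length : Int)
  let ncols := (PySem.List.pyGetD board 0 []).length
  let st := (PySem.List.pyRange 0 (ncols : Int) 1).foldl
    (fun (st : List Int × Int) x =>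
      let c := pvColB board n x st.2
      (st.1 ++ [c.2.1], c.2.2))
    ([], (0 : Int))
  let heights := st.1
  let holes := st.2
  let agg := heights.sum
  let bump := ((heights.zip (PySem.List.slice heights (some 1) none)).map
      (fun p => |p.1 - p.2|)).sum
  heights ++ [holes, agg, bump]

-- ===== PRECONDITION & SPEC =====
-- A raises IndexError on board = [] (board[0]) and when some row is shorter than row 0
-- (board[y][x] for x < len(board[0])); exactly those inputs are excluded.
def Pre_get_board_features (board : List (List Int)) : Prop :=
  board ≠ [] ∧ ∀ row ∈ board, (board.headD []).length ≤ row.length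
instance (board : List (List Int)) : Decidable (Pre_get_board_features board) := by
  unfold Pre_get_board_features; infer_instance

def pvWitness_get_board_features : List (List Int) := [[0, 2], [1, 0]]

def Spec_get_board_features (board : List (List Int)) (out : List Int) : Prop := out = get_board_features_alt board
instance (board : List (List Int)) (out : List Int) : Decidable (Spec_get_board_features board out) := by unfold Spec_get_board_features; infer_instance

-- ===== CLAIM (what is proved, stated in full; the proofs are below) =====
def Claim_equal_get_board_features : Prop := ∀ (board : List (List Int)), Dom_get_board_features board → Pre_get_board_features board → Spec_get_board_features board (get_board_features board)

-- ===== LEMMAS AND PROOFS =====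

-- the common closed form of one column: height from position y on, and holes below the first block
def pvHS (n : Int) (x : Int) : Int → List (List Int) → Int
  | _, [] => 0
  | y, r :: rs => if PySem.List.pyGetD r x 0 > 0 then n - y else pvHS n x (y + 1) rs

def pvZero (x : Int) (r : List Int) : Bool := PySem.List.pyGetD r x 0 == 0

def pvHolesAfter (x : Int) : List (List Int) → Int
  | [] => 0
  | r :: rs => if PySem.List.pyGetD r x 0 > 0 then (rs.countP (pvZero x) : Int) else pvHolesAfter x rs

lemma pvSet_natCast (xs : List Int) (k : Nat) (v : Int) (h : k < xs.length) :
    PySem.List.pySetD xs (k : Int) v = xs.set k v := by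
  simp [PySem.List.pySetD, PySem.List.pySet?, PySem.List.pyIdx?, h]

-- A's break-loop equals pvHS
lemma pvHeightA_eq (board : List (List Int)) (x : Int) :
    ∀ (k a : Nat), a + k = board.length →
      pvHeightLoopA board x (PySem.List.pyRange (a : Int) (board.length : Int) 1)
        = pvHS (board.length : Int) x (a : Int) (board.drop a) := by
  intro k
  induction k with
  | zero =>
    intro a ha
    rw [PySem.List.pyRange_one_eq_nil (by omega : (board.length : Int) ≤ (a : Int)),
        List.drop_eq_nil_of_le (by omega)]
    simp [pvHeightLoopA, pvHS]
  | succ k ih =>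
    intro a ha
    have hlt : a < board.length := by omega
    rw [PySem.List.pyRange_one_cons (by exact_mod_cast hlt : (a : Int) < (board.length : Int)),
        List.drop_eq_getElem_cons hlt]
    have hcell : pvCellA board (a : Int) x = PySem.List.pyGetD board[a] x 0 := by
      simp [pvCellA, PySem.List.pyGetD_natCast, List.getD_eq_getElem?_getD, List.getElem?_eq_getElem hlt]
    simp only [pvHeightLoopA, pvHS, hcell]
    by_cases h : PySem.List.pyGetD board[a] x 0 > 0
    · simp [h]
    · simp only [h, if_false]
      have : ((a : Int) + 1) = ((a + 1 : Nat) : Int) := by push_cast; ring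
      rw [this, ih (a + 1) (by omega)]

-- bounds of pvHS and the bridge from A's rescan start index to the holes-after count
lemma pvKey (board : List (List Int)) (x : Int) :
    ∀ (rows : List (List Int)) (a : Nat), board.drop a = rows → a + rows.length = board.length →
      0 ≤ pvHS (board.length : Int) x (a : Int) rows ∧
      pvHS (board.length : Int) x (a : Int) rows ≤ (board.length : Int) ∧
      (((board.drop ((board.length : Int) - pvHS (board.length : Int) x (a : Int) rows).toNat).countP (pvZero x) : Nat) : Int)
        = pvHolesAfter x rows := by
  intro rows
  induction rows with
  | nil =>
    intro a hd hlen
    simp only [pvHS, pvHolesAfter]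
    refine ⟨le_refl 0, by omega, ?_⟩
    simp only [sub_zero, Int.toNat_natCast]
    rw [List.drop_length]
    simp
  | cons r rs ih =>
    intro a hd hlen
    have hlt : a < board.length := by simp at hlen; omega
    simp only [pvHS, pvHolesAfter]
    by_cases hp : PySem.List.pyGetD r x 0 > 0
    · simp only [hp, if_pos]
      refine ⟨by omega, by omega, ?_⟩
      have h1 : ((board.length : Int) - ((board.length : Int) - (a : Int))).toNat = a := by omega
      rw [h1, hd]
      have hz : pvZero x r = false := by
        simp [pvZero]; omega
      simp [hz]
    · simp only [hp, if_false]
      have hd' : board.drop (a + 1) = rs := by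
        have h2 : List.drop 1 (List.drop a board) = List.drop (a + 1) board :=
          List.drop_drop
        rw [← h2, hd]
        simp
      have : ((a : Int) + 1) = ((a + 1 : Nat) : Int) := by push_cast; ring
      rw [this]
      exact ih (a + 1) hd' (by simp at hlen ⊢; omega)

lemma pvColA_eq (board : List (List Int)) (x : Int) :
    pvColA board x = (pvHS (board.length : Int) x 0 board, pvHolesAfter x board) := by
  obtain ⟨h0, hle, hcount⟩ := pvKey board x board 0 (by simp) (by simp)
  simp only [Nat.cast_zero] at h0 hle hcount
  have hh : pvHeightLoopA board x (PySem.List.pyRange 0 (board.length : Int) 1)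
      = pvHS (board.length : Int) x 0 board := by
    simpa using pvHeightA_eq board x board.length 0 (by omega)
  simp only [pvColA, pvCellA]
  rw [hh]
  refine Prod.ext rfl ?_
  dsimp only
  rw [← hcount]
  have h2 := PySem.List.foldl_pyRange_pyGetD' board []
    (fun (c : Int) r => if PySem.List.pyGetD r x 0 == 0 then c + 1 else c) 0
    (by omega : (0 : Int) ≤ (board.length : Int) - pvHS (board.length : Int) x 0 board)
  have h3 := PySem.List.foldl_count_if (fun (r : List Int) => PySem.List.pyGetD r x 0 == 0)
    (List.drop ((board.length : Int) - pvHS (board.length : Int) x 0 board).toNat board) (0 : Int)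
  exact h2.trans (by simpa [pvZero] using h3)

-- B's loop body, named for the proofs (definitionally the lambda in pvColB)
def pvStepB (n x : Int) (c : Bool × Int × Int) (yr : Int × List Int) : Bool × Int × Int :=
  let v := PySem.List.pyGetD yr.2 x 0
  if c.1 then (if v == 0 then (c.1, c.2.1, c.2.2 + 1) else c)
  else if v > 0 then (true, n - yr.1, c.2.2) else c

lemma pvColB_def (board : List (List Int)) (n x holes0 : Int) :
    pvColB board n x holes0 = (PySem.List.enumerate board 0).foldl (pvStepB n x) (false, 0, holes0) := rfl

-- B's pass once the flag is set only counts zeros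
lemma pvColB_seen (n x : Int) :
    ∀ (rows : List (List Int)) (y h c : Int),
      (PySem.List.enumerate rows y).foldl (pvStepB n x) (true, h, c)
      = (true, h, c + (rows.countP (pvZero x) : Int)) := by
  intro rows
  induction rows with
  | nil => intro y h c; simp [PySem.List.enumerate_nil]
  | cons r rs ih =>
    intro y h c
    rw [PySem.List.enumerate_cons, List.foldl_cons]
    by_cases hz : PySem.List.pyGetD r x 0 = 0
    · have hstep : pvStepB n x (true, h, c) (y, r) = (true, h, c + 1) := by simp [pvStepB, hz]
      rw [hstep, ih (y + 1) h (c + 1)]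
      simp [pvZero, hz]
      ring
    · have hstep : pvStepB n x (true, h, c) (y, r) = (true, h, c) := by simp [pvStepB, hz]
      rw [hstep, ih (y + 1) h c]
      simp [pvZero, hz]

-- B's one fused pass computes the same height and holes-below-it as A's two passes
lemma pvColB_fold_eq (n x : Int) :
    ∀ (rows : List (List Int)) (y c : Int),
      (PySem.List.enumerate rows y).foldl (pvStepB n x) (false, 0, c)
      = (rows.any (fun r => decide (PySem.List.pyGetD r x 0 > 0)),
         pvHS n x y rows, c + pvHolesAfter x rows) := by
  intro rows
  induction rows with
  | nil => intro y c; simp [PySem.List.enumerate_nil, pvHS, pvHolesAfter]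
  | cons r rs ih =>
    intro y c
    rw [PySem.List.enumerate_cons, List.foldl_cons]
    by_cases hp : PySem.List.pyGetD r x 0 > 0
    · have hstep : pvStepB n x (false, 0, c) (y, r) = (true, n - y, c) := by
        simp [pvStepB, hp]
      rw [hstep, pvColB_seen n x rs (y + 1) (n - y) c]
      simp [pvHS, pvHolesAfter, hp]
    · have hstep : pvStepB n x (false, 0, c) (y, r) = (false, 0, c) := by
        simp [pvStepB, hp]
      rw [hstep, ih (y + 1) c]
      simp [pvHS, pvHolesAfter, hp]

-- A's outer loop: writing heights[x] in order into [0]*ncols builds the map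
lemma pvMainA (f g : Nat → Int) :
    ∀ (m ncols : Nat), m ≤ ncols →
      (List.range m).foldl
        (fun (st : List Int × Int) (k : Nat) => (PySem.List.pySetD st.1 (k : Int) (f k), st.2 + g k))
        (List.replicate ncols 0, 0)
      = ((List.range m).map f ++ List.replicate (ncols - m) 0, ((List.range m).map g).sum) := by
  intro m
  induction m with
  | zero => intro ncols _; simp
  | succ m ih =>
    intro ncols hm
    rw [List.range_succ, List.foldl_append, ih ncols (by omega), List.foldl_cons, List.foldl_nil]
    have hlen : ((List.range m).map f).length = m := by simp
    have hrep : List.replicate (ncols - m) (0 : Int) = 0 :: List.replicate (ncols - (m + 1)) 0 := by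
      have : ncols - m = (ncols - (m + 1)) + 1 := by omega
      rw [this, List.replicate_succ]
    have hset : PySem.List.pySetD ((List.range m).map f ++ List.replicate (ncols - m) 0) (m : Int) (f m)
        = ((List.range m).map f ++ [f m]) ++ List.replicate (ncols - (m + 1)) 0 := by
      rw [pvSet_natCast _ _ _ (by simp; omega), hrep,
          List.set_append_right _ _ (by omega : ((List.range m).map f).length ≤ m), hlen]
      simp
    refine Prod.ext ?_ ?_
    · dsimp only
      rw [hset]
      simp
    · dsimp only
      simp

-- B's outer loop: appending builds the same map
lemma pvMainB (f g : Nat → Int) (m : Nat) :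
    (List.range m).foldl
      (fun (st : List Int × Int) (k : Nat) => (st.1 ++ [f k], st.2 + g k))
      ([], 0)
    = ((List.range m).map f, ((List.range m).map g).sum) := by
  induction m with
  | zero => simp
  | succ m ih =>
    rw [List.range_succ, List.foldl_append, ih, List.foldl_cons, List.foldl_nil]
    simp

-- the two bumpiness computations agree on any heights list
lemma pvBumpAux (t : List Int) : ∀ (a : Int),
    ((List.range t.length).map
        (fun k => |(a :: t).getD k 0 - (a :: t).getD (k + 1) 0|)).sum
      = (((a :: t).zip t).map (fun p => |p.1 - p.2|)).sum := by
  induction t with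
  | nil => intro a; simp
  | cons b t' ih =>
    intro a
    rw [List.length_cons, List.range_succ_eq_map, List.map_cons, List.map_map, List.sum_cons]
    simp only [Function.comp_def, Nat.succ_eq_add_one, List.getD_cons_succ, List.getD_cons_zero]
    have ih' := ih b
    simp only [List.getD_cons_succ] at ih'
    rw [ih']
    simp

lemma pvBump_eq (hs : List Int) :
    ((PySem.List.pyRange 0 ((hs.length : Int) - 1) 1).map
        (fun i => |PySem.List.pyGetD hs i 0 - PySem.List.pyGetD hs (i + 1) 0|)).sum
      = ((hs.zip (PySem.List.slice hs (some 1) none)).map (fun p => |p.1 - p.2|)).sum := by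
  rw [PySem.List.slice_from_one]
  cases hs with
  | nil => simp
  | cons a t =>
    rw [List.tail_cons]
    have h1 : (((a :: t).length : Int)) - 1 = ((t.length : Nat) : Int) := by simp
    rw [h1, PySem.List.pyRange_zero_nat, List.map_map]
    have h2 : ((fun i => |PySem.List.pyGetD (a :: t) i 0 - PySem.List.pyGetD (a :: t) (i + 1) 0|) ∘
          (fun (k : Nat) => (k : Int)))
        = fun (k : Nat) => |(a :: t).getD k 0 - (a :: t).getD (k + 1) 0| := by
      funext k
      simp only [Function.comp_def]
      rw [show ((k : Int) + 1) = ((k + 1 : Nat) : Int) by push_cast; ring,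
          PySem.List.pyGetD_natCast, PySem.List.pyGetD_natCast]
    rw [h2]
    exact pvBumpAux t a

-- ===== VERDICT (by name: the statement is the Claim_ definition above) =====
theorem get_board_features_spec : Claim_equal_get_board_features := by
  intro board _ _
  unfold Spec_get_board_features
  have hcolA : ∀ k : Nat, pvColA board (k : Int)
      = (pvHS (board.length : Int) (k : Int) 0 board, pvHolesAfter (k : Int) board) :=
    fun k => pvColA_eq board (k : Int)
  have hA := pvMainA (fun (k : Nat) => (pvColA board (k : Int)).1) (fun (k : Nat) => (pvColA board (k : Int)).2)
    ((PySem.List.pyGetD board 0 []).length) ((PySem.List.pyGetD board 0 []).length) le_rfl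
  have hB := pvMainB (fun (k : Nat) => pvHS (board.length : Int) (k : Int) 0 board)
    (fun (k : Nat) => pvHolesAfter (k : Int) board) ((PySem.List.pyGetD board 0 []).length)
  have hfunB : (fun (st : List Int × Int) (x : Int) =>
        ((st.1 ++ [(pvColB board (board.length : Int) x st.2).2.1],
          (pvColB board (board.length : Int) x st.2).2.2) : List Int × Int))
      = fun st x => (st.1 ++ [pvHS (board.length : Int) x 0 board], st.2 + pvHolesAfter x board) := by
    funext st x
    rw [pvColB_def, pvColB_fold_eq]
  have hmap1 : (List.range ((PySem.List.pyGetD board 0 []).length)).map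
        (fun (k : Nat) => (pvColA board (k : Int)).1)
      = (List.range ((PySem.List.pyGetD board 0 []).length)).map
        (fun (k : Nat) => pvHS (board.length : Int) (k : Int) 0 board) := by
    apply List.map_congr_left; intro k _; rw [hcolA k]
  have hmap2 : (List.range ((PySem.List.pyGetD board 0 []).length)).map
        (fun (k : Nat) => (pvColA board (k : Int)).2)
      = (List.range ((PySem.List.pyGetD board 0 []).length)).map
        (fun (k : Nat) => pvHolesAfter (k : Int) board) := by
    apply List.map_congr_left; intro k _; rw [hcolA k]
  simp only [get_board_features, get_board_features_alt]
  rw [PySem.List.pyRange_zero_nat, List.foldl_map]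
  rw [Nat.sub_self, List.replicate_zero, List.append_nil] at hA
  rw [hA, hfunB, List.foldl_map, hB, hmap1, hmap2]
  dsimp only
  rw [pvBump_eq]
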